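-- pv_equiv track=rewrite | github.com/HadleyLab/mcode_translator | src/workflows/trials_optimizer_workflow.py | _summarize_errors
-- ===== SOURCE A (Python) =====
-- from typing import Any, Dict, List, Optional
--
-- def _summarize_errors(all_results: List[Dict]) -> Dict[str, int]:
--     """Summarize error types across all results with strict categorization."""
--     error_counts = {
--         "json_parsing": 0,
--         "quota_exceeded": 0,
--         "rate_limit": 0,
--         "auth_error": 0,
--         "api_error": 0,
--         "network_error": 0,
--         "timeout": 0,
--         "model_error": 0,
--         "other": 0
--     }
--
--     for result in all_results:
--         errors = result.get("errors", [])
--         for error in errors: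
--             error_str = str(error).lower()
--
--             # Strict error categorization matching the analysis
--             if "json" in error_str and ("parsing" in error_str or "decode" in error_str or "invalid json" in error_str or "expecting" in error_str):
--                 error_counts["json_parsing"] += 1
--             elif "quota" in error_str or "billing" in error_str or "plan" in error_str or "insufficient_quota" in error_str:
--                 error_counts["quota_exceeded"] += 1
--             elif "rate limit" in error_str or "429" in error_str or "too many requests" in error_str:
--                 error_counts["rate_limit"] += 1
--             elif "auth" in error_str or "unauthorized" in error_str or "forbidden" in error_str or "401" in error_str or "403" in error_str:
--                 error_counts["auth_error"] += 1
--             elif "timeout" in error_str or "timed out" in error_str: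
--                 error_counts["timeout"] += 1
--             elif "connection" in error_str or "network" in error_str or "dns" in error_str:
--                 error_counts["network_error"] += 1
--             elif "api" in error_str and not any(x in error_str for x in ["json", "quota", "rate", "auth", "timeout", "connection"]):
--                 error_counts["api_error"] += 1
--             elif "model" in error_str and ("not found" in error_str or "does not exist" in error_str):
--                 error_counts["model_error"] += 1
--             else:
--                 error_counts["other"] += 1
--
--     return error_counts
-- ===== SOURCE B (Python) =====
-- _KEYS = ["json_parsing", "quota_exceeded", "rate_limit", "auth_error", "api_error",
--          "network_error", "timeout", "model_error", "other"]
--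
--
-- def _p_json(s):
--     return "json" in s and ("parsing" in s or "decode" in s or "invalid json" in s or "expecting" in s)
--
--
-- def _p_quota(s):
--     return "quota" in s or "billing" in s or "plan" in s or "insufficient_quota" in s
--
--
-- def _p_rate(s):
--     return "rate limit" in s or "429" in s or "too many requests" in s
--
--
-- def _p_auth(s):
--     return "auth" in s or "unauthorized" in s or "forbidden" in s or "401" in s or "403" in s
--
--
-- def _p_timeout(s):
--     return "timeout" in s or "timed out" in s
--
--
-- def _p_network(s):
--     return "connection" in s or "network" in s or "dns" in s
--
--
-- def _p_api(s):
--     return "api" in s and not any(x in s for x in ["json", "quota", "rate", "auth", "timeout", "connection"])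
--
--
-- def _p_model(s):
--     return "model" in s and ("not found" in s or "does not exist" in s)
--
--
-- # sieve order = A's elif ladder order (not the output-dict order)
-- _RULES = [("json_parsing", _p_json), ("quota_exceeded", _p_quota), ("rate_limit", _p_rate),
--           ("auth_error", _p_auth), ("timeout", _p_timeout), ("network_error", _p_network),
--           ("api_error", _p_api), ("model_error", _p_model)]
--
--
-- def _summarize_errors(all_results):
--     """Sieve: one filtering pass over the shrinking error pool per category.
--
--     Each stage counts and then removes the errors matching its predicate, so a
--     later stage only ever sees errors no earlier rule matched -- exactly the
--     first-match-wins semantics of an elif ladder, but as per-category passes.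
--     """
--     remaining = [str(e).lower() for r in all_results for e in r.get("errors", [])]
--     counts = {}
--     for name, pred in _RULES:
--         counts[name] = sum(1 for s in remaining if pred(s))
--         remaining = [s for s in remaining if not pred(s)]
--     counts["other"] = len(remaining)
--     return {k: counts[k] for k in _KEYS}
-- ===== Notes on version B (the rewrite author's own statement) =====
-- stated objective: alternative
-- what changed: Replaces A's single pass with a per-error if/elif cascade into a mutable counter dict by a sieve: the flattened lowercased error pool is scanned once per category in ladder order, each stage counting and then removing the errors its predicate matches, so first-match-wins falls out of the pool shrinking rather than from branch order; the leftovers are 'other'.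
import Mathlib
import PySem

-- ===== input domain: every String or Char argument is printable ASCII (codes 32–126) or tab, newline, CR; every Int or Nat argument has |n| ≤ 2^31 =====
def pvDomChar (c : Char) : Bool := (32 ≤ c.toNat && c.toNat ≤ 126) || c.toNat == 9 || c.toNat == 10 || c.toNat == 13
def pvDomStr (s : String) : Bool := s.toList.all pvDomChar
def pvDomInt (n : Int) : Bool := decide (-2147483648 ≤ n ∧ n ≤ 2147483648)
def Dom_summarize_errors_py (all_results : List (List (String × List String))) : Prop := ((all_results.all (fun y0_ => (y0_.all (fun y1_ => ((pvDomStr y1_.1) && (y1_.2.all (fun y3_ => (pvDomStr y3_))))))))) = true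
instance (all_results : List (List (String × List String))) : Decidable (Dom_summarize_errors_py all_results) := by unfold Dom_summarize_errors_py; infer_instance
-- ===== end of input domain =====

-- B replaces A's per-error if/elif cascade into a mutable counter dict by a sieve:
-- one counting-and-filtering pass over a shrinking error pool per category (alternative decomposition, no speed claim).

-- ===== PORT A =====
-- inner loop body of A: the if/elif ladder incrementing one key of the counter dict
def pvStepA (ec : PySem.Dict String Int) (error : String) : PySem.Dict String Int :=
  let s := PySem.Str.lower error
  if PySem.Str.isIn "json" s && (PySem.Str.isIn "parsing" s || PySem.Str.isIn "decode" s || PySem.Str.isIn "invalid json" s || PySem.Str.isIn "expecting" s) then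
    ec.insert "json_parsing" (ec.getD "json_parsing" 0 + 1)
  else if PySem.Str.isIn "quota" s || PySem.Str.isIn "billing" s || PySem.Str.isIn "plan" s || PySem.Str.isIn "insufficient_quota" s then
    ec.insert "quota_exceeded" (ec.getD "quota_exceeded" 0 + 1)
  else if PySem.Str.isIn "rate limit" s || PySem.Str.isIn "429" s || PySem.Str.isIn "too many requests" s then
    ec.insert "rate_limit" (ec.getD "rate_limit" 0 + 1)
  else if PySem.Str.isIn "auth" s || PySem.Str.isIn "unauthorized" s || PySem.Str.isIn "forbidden" s || PySem.Str.isIn "401" s || PySem.Str.isIn "403" s then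
    ec.insert "auth_error" (ec.getD "auth_error" 0 + 1)
  else if PySem.Str.isIn "timeout" s || PySem.Str.isIn "timed out" s then
    ec.insert "timeout" (ec.getD "timeout" 0 + 1)
  else if PySem.Str.isIn "connection" s || PySem.Str.isIn "network" s || PySem.Str.isIn "dns" s then
    ec.insert "network_error" (ec.getD "network_error" 0 + 1)
  else if PySem.Str.isIn "api" s && !(PySem.Str.isIn "json" s || PySem.Str.isIn "quota" s || PySem.Str.isIn "rate" s || PySem.Str.isIn "auth" s || PySem.Str.isIn "timeout" s || PySem.Str.isIn "connection" s) then
    ec.insert "api_error" (ec.getD "api_error" 0 + 1)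
  else if PySem.Str.isIn "model" s && (PySem.Str.isIn "not found" s || PySem.Str.isIn "does not exist" s) then
    ec.insert "model_error" (ec.getD "model_error" 0 + 1)
  else
    ec.insert "other" (ec.getD "other" 0 + 1)

def summarize_errors_py (all_results : List (List (String × List String))) : List (String × Int) :=
  let error_counts : PySem.Dict String Int :=
    PySem.Dict.mk [("json_parsing", 0), ("quota_exceeded", 0), ("rate_limit", 0), ("auth_error", 0),
                   ("api_error", 0), ("network_error", 0), ("timeout", 0), ("model_error", 0), ("other", 0)]
  (all_results.foldl (fun ec result =>
    let errors := PySem.Dict.getD (PySem.Dict.mk result) "errors" []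
    errors.foldl pvStepA ec) error_counts).items

-- ===== PORT B =====
-- B's eight per-category predicates over an already-lowercased error string
def pvPJson (s : String) : Bool := PySem.Str.isIn "json" s && (PySem.Str.isIn "parsing" s || PySem.Str.isIn "decode" s || PySem.Str.isIn "invalid json" s || PySem.Str.isIn "expecting" s)
def pvPQuota (s : String) : Bool := PySem.Str.isIn "quota" s || PySem.Str.isIn "billing" s || PySem.Str.isIn "plan" s || PySem.Str.isIn "insufficient_quota" s
def pvPRate (s : String) : Bool := PySem.Str.isIn "rate limit" s || PySem.Str.isIn "429" s || PySem.Str.isIn "too many requests" s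
def pvPAuth (s : String) : Bool := PySem.Str.isIn "auth" s || PySem.Str.isIn "unauthorized" s || PySem.Str.isIn "forbidden" s || PySem.Str.isIn "401" s || PySem.Str.isIn "403" s
def pvPTimeout (s : String) : Bool := PySem.Str.isIn "timeout" s || PySem.Str.isIn "timed out" s
def pvPNetwork (s : String) : Bool := PySem.Str.isIn "connection" s || PySem.Str.isIn "network" s || PySem.Str.isIn "dns" s
def pvPApi (s : String) : Bool := PySem.Str.isIn "api" s && !(PySem.Str.isIn "json" s || PySem.Str.isIn "quota" s || PySem.Str.isIn "rate" s || PySem.Str.isIn "auth" s || PySem.Str.isIn "timeout" s || PySem.Str.isIn "connection" s)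
def pvPModel (s : String) : Bool := PySem.Str.isIn "model" s && (PySem.Str.isIn "not found" s || PySem.Str.isIn "does not exist" s)

-- sieve order = A's elif ladder order (not the output-dict order)
def pvRules : List (String × (String → Bool)) :=
  [("json_parsing", pvPJson), ("quota_exceeded", pvPQuota), ("rate_limit", pvPRate),
   ("auth_error", pvPAuth), ("timeout", pvPTimeout), ("network_error", pvPNetwork),
   ("api_error", pvPApi), ("model_error", pvPModel)]

def summarize_errors_py_alt (all_results : List (List (String × List String))) : List (String × Int) :=
  let remaining := (all_results.flatMap (fun r => PySem.Dict.getD (PySem.Dict.mk r) "errors" [])).map PySem.Str.lower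
  let st := pvRules.foldl
    (fun (acc : PySem.Dict String Int × List String) nr =>
      (acc.1.insert nr.1 ((acc.2.countP nr.2 : Nat) : Int), acc.2.filter (fun s => !nr.2 s)))
    ((PySem.Dict.mk []), remaining)
  let counts := st.1.insert "other" ((st.2.length : Nat) : Int)
  ["json_parsing", "quota_exceeded", "rate_limit", "auth_error", "api_error", "network_error",
   "timeout", "model_error", "other"].map (fun k => (k, counts.getD k 0))

-- ===== PRECONDITION & SPEC =====
def Spec_summarize_errors_py (all_results : List (List (String × List String))) (out : List (String × Int)) : Prop := out = summarize_errors_py_alt all_results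
instance (all_results : List (List (String × List String))) (out : List (String × Int)) : Decidable (Spec_summarize_errors_py all_results out) := by unfold Spec_summarize_errors_py; infer_instance

-- ===== CLAIM (what is proved, stated in full; the proofs are below) =====
def Claim_equal_summarize_errors_py : Prop := ∀ (all_results : List (List (String × List String))), Dom_summarize_errors_py all_results → Spec_summarize_errors_py all_results (summarize_errors_py all_results)

-- ===== LEMMAS AND PROOFS =====

-- proof-only: the category A's ladder increments for a lowercased string
def pvCategory (s : String) : String :=
  if pvPJson s then "json_parsing"
  else if pvPQuota s then "quota_exceeded"
  else if pvPRate s then "rate_limit"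
  else if pvPAuth s then "auth_error"
  else if pvPTimeout s then "timeout"
  else if pvPNetwork s then "network_error"
  else if pvPApi s then "api_error"
  else if pvPModel s then "model_error"
  else "other"

lemma pvStepA_eq (ec : PySem.Dict String Int) (error : String) :
    pvStepA ec error =
      ec.insert (pvCategory (PySem.Str.lower error))
        (ec.getD (pvCategory (PySem.Str.lower error)) 0 + 1) := by
  simp only [pvStepA, pvCategory, pvPJson, pvPQuota, pvPRate, pvPAuth, pvPTimeout, pvPNetwork, pvPApi, pvPModel]
  split_ifs <;> rfl

lemma pvCategory_cases (s : String) :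
    pvCategory s = "json_parsing" ∨ pvCategory s = "quota_exceeded" ∨ pvCategory s = "rate_limit" ∨
    pvCategory s = "auth_error" ∨ pvCategory s = "api_error" ∨ pvCategory s = "network_error" ∨
    pvCategory s = "timeout" ∨ pvCategory s = "model_error" ∨ pvCategory s = "other" := by
  simp only [pvCategory]
  split_ifs <;> simp

-- the counter dict with symbolic values, used only by the proofs below
def pvTbl (a b c d e f g h i : Int) : PySem.Dict String Int :=
  PySem.Dict.mk [("json_parsing", a), ("quota_exceeded", b), ("rate_limit", c), ("auth_error", d), ("api_error", e), ("network_error", f), ("timeout", g), ("model_error", h), ("other", i)]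

lemma pvBump1 (a b c d e f g h i : Int) :
    (pvTbl a b c d e f g h i).insert "json_parsing" ((pvTbl a b c d e f g h i).getD "json_parsing" 0 + 1) = pvTbl (a + 1) b c d e f g h i := rfl
lemma pvBump2 (a b c d e f g h i : Int) :
    (pvTbl a b c d e f g h i).insert "quota_exceeded" ((pvTbl a b c d e f g h i).getD "quota_exceeded" 0 + 1) = pvTbl a (b + 1) c d e f g h i := rfl
lemma pvBump3 (a b c d e f g h i : Int) :
    (pvTbl a b c d e f g h i).insert "rate_limit" ((pvTbl a b c d e f g h i).getD "rate_limit" 0 + 1) = pvTbl a b (c + 1) d e f g h i := rfl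
lemma pvBump4 (a b c d e f g h i : Int) :
    (pvTbl a b c d e f g h i).insert "auth_error" ((pvTbl a b c d e f g h i).getD "auth_error" 0 + 1) = pvTbl a b c (d + 1) e f g h i := rfl
lemma pvBump5 (a b c d e f g h i : Int) :
    (pvTbl a b c d e f g h i).insert "api_error" ((pvTbl a b c d e f g h i).getD "api_error" 0 + 1) = pvTbl a b c d (e + 1) f g h i := rfl
lemma pvBump6 (a b c d e f g h i : Int) :
    (pvTbl a b c d e f g h i).insert "network_error" ((pvTbl a b c d e f g h i).getD "network_error" 0 + 1) = pvTbl a b c d e (f + 1) g h i := rfl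
lemma pvBump7 (a b c d e f g h i : Int) :
    (pvTbl a b c d e f g h i).insert "timeout" ((pvTbl a b c d e f g h i).getD "timeout" 0 + 1) = pvTbl a b c d e f (g + 1) h i := rfl
lemma pvBump8 (a b c d e f g h i : Int) :
    (pvTbl a b c d e f g h i).insert "model_error" ((pvTbl a b c d e f g h i).getD "model_error" 0 + 1) = pvTbl a b c d e f g (h + 1) i := rfl
lemma pvBump9 (a b c d e f g h i : Int) :
    (pvTbl a b c d e f g h i).insert "other" ((pvTbl a b c d e f g h i).getD "other" 0 + 1) = pvTbl a b c d e f g h (i + 1) := rfl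

-- invariant of A's fold over the flattened error list: the table holds category counts
lemma pvFoldA (es : List String) (a b c d e f g h i : Int) :
    (es.foldl pvStepA (pvTbl a b c d e f g h i)).items =
      (let cats := es.map (fun e => pvCategory (PySem.Str.lower e))
       [("json_parsing", a + (cats.count "json_parsing" : Int)),
        ("quota_exceeded", b + (cats.count "quota_exceeded" : Int)),
        ("rate_limit", c + (cats.count "rate_limit" : Int)),
        ("auth_error", d + (cats.count "auth_error" : Int)),
        ("api_error", e + (cats.count "api_error" : Int)),
        ("network_error", f + (cats.count "network_error" : Int)),
        ("timeout", g + (cats.count "timeout" : Int)),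
        ("model_error", h + (cats.count "model_error" : Int)),
        ("other", i + (cats.count "other" : Int))]) := by
  induction es generalizing a b c d e f g h i with
  | nil => simp [pvTbl]
  | cons x xs ih =>
    rw [List.foldl_cons, pvStepA_eq]
    rcases pvCategory_cases (PySem.Str.lower x) with hc | hc | hc | hc | hc | hc | hc | hc | hc
    · rw [hc, pvBump1, ih]; simp [hc]; omega
    · rw [hc, pvBump2, ih]; simp [hc]; omega
    · rw [hc, pvBump3, ih]; simp [hc]; omega
    · rw [hc, pvBump4, ih]; simp [hc]; omega
    · rw [hc, pvBump5, ih]; simp [hc]; omega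
    · rw [hc, pvBump6, ih]; simp [hc]; omega
    · rw [hc, pvBump7, ih]; simp [hc]; omega
    · rw [hc, pvBump8, ih]; simp [hc]; omega
    · rw [hc, pvBump9, ih]; simp [hc]; omega

-- A's nested loop is the fold of pvStepA over the flattened error list
lemma pvFlatten (rs : List (List (String × List String))) (d : PySem.Dict String Int) :
    rs.foldl (fun ec result =>
        (PySem.Dict.getD (PySem.Dict.mk result) "errors" []).foldl pvStepA ec) d =
      (rs.flatMap (fun result => PySem.Dict.getD (PySem.Dict.mk result) "errors" [])).foldl pvStepA d := by
  induction rs generalizing d with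
  | nil => rfl
  | cons r rs ih => simp [List.foldl_append, ih]

-- each sieve stage's count equals the count of that category among all errors
lemma pvSieve1 (l : List String) : l.countP pvPJson = (l.map pvCategory).count "json_parsing" := by
  rw [List.count, List.countP_map]
  apply List.countP_congr; intro s _
  simp only [Function.comp, pvCategory]; split_ifs <;> simp_all
lemma pvSieve2 (l : List String) :
    ((l.filter (fun s => !pvPJson s)).countP pvPQuota) = (l.map pvCategory).count "quota_exceeded" := by
  rw [List.count, List.countP_map, List.countP_filter]
  apply List.countP_congr; intro s _
  simp only [Function.comp, pvCategory]; split_ifs <;> simp_all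
lemma pvSieve3 (l : List String) :
    (((l.filter (fun s => !pvPJson s)).filter (fun s => !pvPQuota s)).countP pvPRate) = (l.map pvCategory).count "rate_limit" := by
  rw [List.count, List.countP_map, List.countP_filter, List.countP_filter]
  apply List.countP_congr; intro s _
  simp only [Function.comp, pvCategory]; split_ifs <;> simp_all
lemma pvSieve4 (l : List String) :
    ((((l.filter (fun s => !pvPJson s)).filter (fun s => !pvPQuota s)).filter (fun s => !pvPRate s)).countP pvPAuth) = (l.map pvCategory).count "auth_error" := by
  rw [List.count, List.countP_map, List.countP_filter, List.countP_filter, List.countP_filter]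
  apply List.countP_congr; intro s _
  simp only [Function.comp, pvCategory]; split_ifs <;> simp_all
lemma pvSieve5 (l : List String) :
    (((((l.filter (fun s => !pvPJson s)).filter (fun s => !pvPQuota s)).filter (fun s => !pvPRate s)).filter (fun s => !pvPAuth s)).countP pvPTimeout) = (l.map pvCategory).count "timeout" := by
  rw [List.count, List.countP_map, List.countP_filter, List.countP_filter, List.countP_filter, List.countP_filter]
  apply List.countP_congr; intro s _
  simp only [Function.comp, pvCategory]; split_ifs <;> simp_all
lemma pvSieve6 (l : List String) :
    ((((((l.filter (fun s => !pvPJson s)).filter (fun s => !pvPQuota s)).filter (fun s => !pvPRate s)).filter (fun s => !pvPAuth s)).filter (fun s => !pvPTimeout s)).countP pvPNetwork) = (l.map pvCategory).count "network_error" := by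
  rw [List.count, List.countP_map, List.countP_filter, List.countP_filter, List.countP_filter, List.countP_filter, List.countP_filter]
  apply List.countP_congr; intro s _
  simp only [Function.comp, pvCategory]; split_ifs <;> simp_all
lemma pvSieve7 (l : List String) :
    (((((((l.filter (fun s => !pvPJson s)).filter (fun s => !pvPQuota s)).filter (fun s => !pvPRate s)).filter (fun s => !pvPAuth s)).filter (fun s => !pvPTimeout s)).filter (fun s => !pvPNetwork s)).countP pvPApi) = (l.map pvCategory).count "api_error" := by
  rw [List.count, List.countP_map, List.countP_filter, List.countP_filter, List.countP_filter, List.countP_filter, List.countP_filter, List.countP_filter]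
  apply List.countP_congr; intro s _
  simp only [Function.comp, pvCategory]; split_ifs <;> simp_all
lemma pvSieve8 (l : List String) :
    ((((((((l.filter (fun s => !pvPJson s)).filter (fun s => !pvPQuota s)).filter (fun s => !pvPRate s)).filter (fun s => !pvPAuth s)).filter (fun s => !pvPTimeout s)).filter (fun s => !pvPNetwork s)).filter (fun s => !pvPApi s)).countP pvPModel) = (l.map pvCategory).count "model_error" := by
  rw [List.count, List.countP_map, List.countP_filter, List.countP_filter, List.countP_filter, List.countP_filter, List.countP_filter, List.countP_filter, List.countP_filter]
  apply List.countP_congr; intro s _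
  simp only [Function.comp, pvCategory]; split_ifs <;> simp_all
lemma pvSieve9 (l : List String) :
    (((((((((l.filter (fun s => !pvPJson s)).filter (fun s => !pvPQuota s)).filter (fun s => !pvPRate s)).filter (fun s => !pvPAuth s)).filter (fun s => !pvPTimeout s)).filter (fun s => !pvPNetwork s)).filter (fun s => !pvPApi s)).filter (fun s => !pvPModel s)).length) = (l.map pvCategory).count "other" := by
  rw [List.count, List.countP_map, ← List.countP_eq_length_filter, List.countP_filter, List.countP_filter, List.countP_filter, List.countP_filter, List.countP_filter, List.countP_filter, List.countP_filter]
  apply List.countP_congr; intro s _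
  simp only [Function.comp, pvCategory]; split_ifs <;> simp_all

-- ===== VERDICT (by name: the statement is the Claim_ definition above) =====
theorem summarize_errors_py_spec : Claim_equal_summarize_errors_py := by
  intro all_results _
  show (all_results.foldl (fun ec result =>
      (PySem.Dict.getD (PySem.Dict.mk result) "errors" []).foldl pvStepA ec)
      (pvTbl 0 0 0 0 0 0 0 0 0)).items = summarize_errors_py_alt all_results
  rw [pvFlatten, pvFoldA]
  set es := all_results.flatMap (fun result => PySem.Dict.getD (PySem.Dict.mk result) "errors" []) with hes
  have hmap : es.map (fun e => pvCategory (PySem.Str.lower e)) = (es.map PySem.Str.lower).map pvCategory := by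
    rw [List.map_map]; rfl
  simp only [summarize_errors_py_alt, pvRules, List.foldl_cons, List.foldl_nil, ← hes, hmap]
  simp only [List.map_cons, List.map_nil]
  rw [pvSieve1, pvSieve2, pvSieve3, pvSieve4, pvSieve5, pvSieve6, pvSieve7, pvSieve8, pvSieve9]
  simp [PySem.Dict.getD_insert]
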